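-- pv_equiv track=rewrite | github.com/ClownRyda/helix-ai-virtual-receptionist | agent/gcal/gcal.py | parse_slot_choice
-- ===== SOURCE A (Python) =====
-- def parse_slot_choice(utterance: str, slots: list[dict]) -> dict | None:
--     """
--     Try to match what the caller said to one of the offered slots.
--     Simple keyword matching — good enough for <5 slots.
--     """
--     utterance_lower = utterance.lower()
--     for slot in slots:
--         label_lower = slot["label"].lower()
--         # Match day names or time
--         for keyword in ["monday", "tuesday", "wednesday", "thursday", "friday",
--                         "saturday", "sunday", "first", "second", "third",
--                         "10", "11", "12", "1:", "2:", "3:", "4:"]: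
--             if keyword in utterance_lower and keyword in label_lower:
--                 return slot
--     # Default: first slot if they say yes/sure/okay/that works
--     for word in ["yes", "sure", "okay", "ok", "works", "good", "great", "that one", "first"]:
--         if word in utterance_lower:
--             return slots[0] if slots else None
--     return None
-- ===== SOURCE B (Python) =====
-- _KEYWORDS = ["monday", "tuesday", "wednesday", "thursday", "friday",
--              "saturday", "sunday", "first", "second", "third",
--              "10", "11", "12", "1:", "2:", "3:", "4:"]
-- _FALLBACK = ["yes", "sure", "okay", "ok", "works", "good", "great", "that one", "first"]
--
--
-- def parse_slot_choice(utterance: str, slots: list[dict]) -> dict | None: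
--     # Inverted nesting: for each keyword the caller said, locate the FIRST slot
--     # whose label contains it, and keep the minimal such slot index (argmin).
--     # The slot at the minimal index is exactly the first slot sharing any
--     # spoken keyword with its label, so first-match-wins order is preserved.
--     ul = utterance.lower()
--     labels = [slot["label"].lower() for slot in slots]
--     best = None
--     for k in _KEYWORDS:
--         if k in ul:
--             for i, lab in enumerate(labels):
--                 if k in lab:
--                     if best is None or i < best:
--                         best = i
--                     break
--     if best is not None:
--         return slots[best]
--     for w in _FALLBACK:
--         if w in ul:
--             return slots[0] if slots else None
--     return None
-- ===== Notes on version B (the rewrite author's own statement) =====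
-- stated objective: alternative
-- what changed: B inverts the loop nesting: for each keyword present in the lowered utterance it finds the first slot index whose lowered label contains it and keeps the minimal such index (argmin over keywords), returning the slot at that index; A instead scans slots and re-tests every keyword per slot. The slot at the minimal index is exactly the first slot sharing a spoken keyword with its label, so first-match-wins order is preserved.
import Mathlib
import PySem

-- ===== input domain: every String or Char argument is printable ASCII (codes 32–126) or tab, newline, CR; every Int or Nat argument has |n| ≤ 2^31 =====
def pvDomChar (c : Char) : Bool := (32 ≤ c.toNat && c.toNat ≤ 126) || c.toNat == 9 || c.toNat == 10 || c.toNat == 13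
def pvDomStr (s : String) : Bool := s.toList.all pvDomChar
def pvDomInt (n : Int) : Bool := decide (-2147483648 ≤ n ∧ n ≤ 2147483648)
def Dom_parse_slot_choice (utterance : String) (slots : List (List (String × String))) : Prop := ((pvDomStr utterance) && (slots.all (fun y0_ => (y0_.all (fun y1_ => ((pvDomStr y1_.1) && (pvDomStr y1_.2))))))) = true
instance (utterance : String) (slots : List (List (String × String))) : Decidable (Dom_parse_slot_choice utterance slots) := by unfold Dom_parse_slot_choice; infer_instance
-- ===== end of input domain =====

-- B inverts the loop nesting: for each keyword present in the utterance it finds the first slot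
-- index whose label contains it and returns the slot at the minimal such index (argmin over
-- keywords), instead of A's scan over slots re-testing every keyword (objective: alternative);
-- A = B proved on inputs whose slots all carry a "label" key.


-- ===== PORT A =====
def pvKeywords : List String :=
  ["monday", "tuesday", "wednesday", "thursday", "friday",
   "saturday", "sunday", "first", "second", "third",
   "10", "11", "12", "1:", "2:", "3:", "4:"]

def pvFallback : List String :=
  ["yes", "sure", "okay", "ok", "works", "good", "great", "that one", "first"]

-- slot["label"] : first-match association lookup (total stand-in; Pre_ guarantees the key is present)
def pvLabel (slot : List (String × String)) : String :=
  ((PySem.Dict.mk slot).get? "label").getD ""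

-- inner 'for keyword in [...]: if keyword in utterance_lower and keyword in label_lower: return slot'
def pvInnerA (ul ll : String) : List String → Bool
  | [] => false
  | k :: ks =>
    if PySem.Str.isIn k ul && PySem.Str.isIn k ll then true else pvInnerA ul ll ks

-- outer 'for slot in slots'
def pvOuterA (ul : String) : List (List (String × String)) → Option (List (String × String))
  | [] => none
  | s :: rest =>
    if pvInnerA ul (PySem.Str.lower (pvLabel s)) pvKeywords then some s else pvOuterA ul rest

-- 'for word in [...]: if word in utterance_lower: return slots[0] if slots else None'
def pvFallbackA (ul : String) (slots : List (List (String × String))) : List String → Option (List (String × String))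
  | [] => none
  | w :: ws =>
    if PySem.Str.isIn w ul then (if slots.isEmpty then none else slots.head?) else pvFallbackA ul slots ws

def parse_slot_choice (utterance : String) (slots : List (List (String × String))) : Option (List (String × String)) :=
  let ul := PySem.Str.lower utterance
  match pvOuterA ul slots with
  | some s => some s
  | none => pvFallbackA ul slots pvFallback

-- ===== PORT B =====
-- inner 'for i, lab in enumerate(labels): if k in lab: ... break'
def pvFirstIdx (k : String) : List String → Option Nat
  | [] => none
  | lab :: rest =>
    if PySem.Str.isIn k lab then some 0 else (pvFirstIdx k rest).map (· + 1)

-- 'if best is None or i < best: best = i'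
def pvStepB (ul : String) (labels : List String) (best : Option Nat) (k : String) : Option Nat :=
  if PySem.Str.isIn k ul then
    match pvFirstIdx k labels with
    | some i =>
      match best with
      | none => some i
      | some b => if i < b then some i else some b
    | none => best
  else best

def parse_slot_choice_alt (utterance : String) (slots : List (List (String × String))) : Option (List (String × String)) :=
  let ul := PySem.Str.lower utterance
  let labels := slots.map (fun slot => PySem.Str.lower (pvLabel slot))
  let best := pvKeywords.foldl (pvStepB ul labels) none
  match best with
  | some b => PySem.List.pyGet? slots (Int.ofNat b)
  | none =>
    if pvFallback.any (fun w => PySem.Str.isIn w ul) then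
      (if slots.isEmpty then none else slots.head?)
    else none

-- ===== PRECONDITION & SPEC =====
-- Pre_ excludes slot dicts without a "label" key: on those Python raises KeyError — A when its
-- slot scan reaches such a slot (it may still return if an earlier slot matches), B always,
-- since it gathers all labels up front.
def Pre_parse_slot_choice (utterance : String) (slots : List (List (String × String))) : Prop :=
  ∀ slot ∈ slots, (PySem.Dict.mk slot).contains "label" = true
instance (utterance : String) (slots : List (List (String × String))) : Decidable (Pre_parse_slot_choice utterance slots) := by unfold Pre_parse_slot_choice; infer_instance

def pvWitness_parse_slot_choice : String × (List (List (String × String))) :=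
  ("yes monday", [[("label", "Monday 10:00")], [("label", "Tuesday 2:00")]])

def Spec_parse_slot_choice (utterance : String) (slots : List (List (String × String))) (out : Option (List (String × String))) : Prop := out = parse_slot_choice_alt utterance slots
instance (utterance : String) (slots : List (List (String × String))) (out : Option (List (String × String))) : Decidable (Spec_parse_slot_choice utterance slots out) := by unfold Spec_parse_slot_choice; infer_instance

-- ===== CLAIM (what is proved, stated in full; the proofs are below) =====
def Claim_equal_parse_slot_choice : Prop := ∀ (utterance : String) (slots : List (List (String × String))), Dom_parse_slot_choice utterance slots → Pre_parse_slot_choice utterance slots → Spec_parse_slot_choice utterance slots (parse_slot_choice utterance slots)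

-- ===== LEMMAS AND PROOFS =====

-- minimum on Option Nat, none = +infinity
def pvOmin : Option Nat → Option Nat → Option Nat
  | none, o => o
  | some a, none => some a
  | some a, some b => some (min a b)

theorem pvOmin_none_right (a : Option Nat) : pvOmin a none = a := by cases a <;> rfl

theorem pvOmin_none_left (o : Option Nat) : pvOmin none o = o := rfl

theorem pvOmin_assoc (a b c : Option Nat) : pvOmin (pvOmin a b) c = pvOmin a (pvOmin b c) := by
  cases a <;> cases b <;> cases c <;> simp [pvOmin, Nat.min_assoc]

-- first index satisfying p, same recursion shape as pvFirstIdx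
def pvRefIdx {α : Type} (p : α → Bool) : List α → Option Nat
  | [] => none
  | x :: xs => if p x then some 0 else (pvRefIdx p xs).map (· + 1)

theorem pvFirstIdx_eq (k : String) (labels : List String) :
    pvFirstIdx k labels = pvRefIdx (fun lab => PySem.Str.isIn k lab) labels := by
  induction labels with
  | nil => rfl
  | cons lab rest ih => simp [pvFirstIdx, pvRefIdx, ih]

theorem pvRefIdx_congr {α : Type} (p q : α → Bool) (l : List α) (h : ∀ x, p x = q x) :
    pvRefIdx p l = pvRefIdx q l := by
  induction l with
  | nil => rfl
  | cons x xs ih => simp [pvRefIdx, h, ih]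

theorem pvRefIdx_false {α : Type} (l : List α) : pvRefIdx (fun _ => false) l = none := by
  induction l with
  | nil => rfl
  | cons x xs ih => simp [pvRefIdx, ih]

theorem pvOmin_map (a b : Option Nat) :
    pvOmin (a.map (· + 1)) (b.map (· + 1)) = (pvOmin a b).map (· + 1) := by
  cases a <;> cases b <;> simp [pvOmin]

theorem pvRefIdx_or {α : Type} (p q : α → Bool) (l : List α) :
    pvOmin (pvRefIdx p l) (pvRefIdx q l) = pvRefIdx (fun x => p x || q x) l := by
  induction l with
  | nil => rfl
  | cons x xs ih =>
    by_cases hp : p x = true <;> by_cases hq : q x = true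
    · simp [pvRefIdx, hp, hq, pvOmin]
    · simp only [pvRefIdx, hp, hq, if_true, Bool.true_or]
      cases pvRefIdx q xs <;> simp [pvOmin]
    · simp only [pvRefIdx, hp, hq, if_true, Bool.or_true]
      cases pvRefIdx p xs <;> simp [pvOmin]
    · simp only [pvRefIdx, hp, hq, Bool.false_eq_true, if_false, Bool.false_or]
      rw [pvOmin_map, ih]

theorem pvRefIdx_lt {α : Type} (p : α → Bool) (l : List α) (i : Nat)
    (h : pvRefIdx p l = some i) : i < l.length := by
  induction l generalizing i with
  | nil => simp [pvRefIdx] at h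
  | cons x xs ih =>
    by_cases hp : p x = true
    · simp [pvRefIdx, hp] at h
      simp [← h]
    · simp [pvRefIdx, hp] at h
      obtain ⟨j, hj, rfl⟩ := h
      have := ih j hj
      simp
      omega

theorem pvRefIdx_bind {α : Type} (p : α → Bool) (l : List α) :
    (pvRefIdx p l).bind (fun i => l[i]?) = l.find? p := by
  induction l with
  | nil => rfl
  | cons x xs ih =>
    by_cases hp : p x = true <;> simp [pvRefIdx, hp, List.find?]
    rw [← ih]
    cases pvRefIdx p xs <;> simp

theorem pvRefIdx_map {α β : Type} (p : β → Bool) (f : α → β) (l : List α) :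
    pvRefIdx p (l.map f) = pvRefIdx (fun x => p (f x)) l := by
  induction l with
  | nil => rfl
  | cons x xs ih => simp [pvRefIdx, ih]

-- the fold step is pvOmin with the keyword's (guarded) first index
theorem pvStepB_eq (ul : String) (labels : List String) (best : Option Nat) (k : String) :
    pvStepB ul labels best k
      = pvOmin best (if PySem.Str.isIn k ul then pvFirstIdx k labels else none) := by
  unfold pvStepB
  by_cases h : PySem.Str.isIn k ul = true
  · rw [if_pos h, if_pos h]
    cases pvFirstIdx k labels with
    | none => cases best <;> simp [pvOmin]
    | some i =>
      cases best with
      | none => simp [pvOmin]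
      | some b => by_cases hib : i < b <;> simp [hib, pvOmin] <;> omega
  · rw [if_neg h, if_neg h, pvOmin_none_right]

theorem pvFoldB (ul : String) (labels : List String) (ks : List String) (acc : Option Nat) :
    ks.foldl (pvStepB ul labels) acc
      = pvOmin acc (pvRefIdx (fun lab => ks.any fun k => PySem.Str.isIn k ul && PySem.Str.isIn k lab) labels) := by
  induction ks generalizing acc with
  | nil =>
    rw [List.foldl_nil,
        pvRefIdx_congr (fun lab => List.any [] fun k => PySem.Str.isIn k ul && PySem.Str.isIn k lab)
          (fun _ => false) labels (fun _ => rfl),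
        pvRefIdx_false, pvOmin_none_right]
  | cons k ks ih =>
    rw [List.foldl_cons, ih, pvStepB_eq, pvOmin_assoc,
        pvRefIdx_congr (fun lab => (k :: ks).any fun k => PySem.Str.isIn k ul && PySem.Str.isIn k lab)
          (fun lab => (PySem.Str.isIn k ul && PySem.Str.isIn k lab)
            || ks.any fun k => PySem.Str.isIn k ul && PySem.Str.isIn k lab)
          labels (fun lab => by simp)]
    by_cases h : PySem.Str.isIn k ul = true
    · have h1 : (if PySem.Str.isIn k ul then pvFirstIdx k labels else none)
          = pvRefIdx (fun lab => PySem.Str.isIn k ul && PySem.Str.isIn k lab) labels := by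
        rw [if_pos h, pvFirstIdx_eq]
        exact pvRefIdx_congr _ _ _ (fun lab => by rw [h, Bool.true_and])
      rw [h1, pvRefIdx_or]
    · have hf : PySem.Str.isIn k ul = false := Bool.eq_false_iff.mpr h
      rw [if_neg h, pvOmin_none_left]
      exact congrArg (pvOmin acc)
        (pvRefIdx_congr _ _ _ (fun lab => by rw [hf, Bool.false_and, Bool.false_or]))

-- A's inner keyword scan = 'some keyword occurs in both strings'
theorem pvInnerA_eq_any (ul ll : String) (ks : List String) :
    pvInnerA ul ll ks = ks.any (fun k => PySem.Str.isIn k ul && PySem.Str.isIn k ll) := by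
  induction ks with
  | nil => rfl
  | cons k ks ih =>
    by_cases h : (PySem.Chars.isIn k.toList ul.toList && PySem.Chars.isIn k.toList ll.toList) = true <;>
      simp [pvInnerA, h, ih]

-- A's outer slot scan = find? with the shared-keyword predicate
theorem pvOuterA_eq_find? (ul : String) (slots : List (List (String × String))) :
    pvOuterA ul slots
      = slots.find? (fun slot =>
          pvKeywords.any fun k =>
            PySem.Str.isIn k ul && PySem.Str.isIn k (PySem.Str.lower (pvLabel slot))) := by
  induction slots with
  | nil => rfl
  | cons s rest ih =>
    by_cases h : (pvKeywords.any fun k =>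
        PySem.Chars.isIn k.toList ul.toList
          && PySem.Chars.isIn k.toList (PySem.Chars.lower (pvLabel s).toList)) = true <;>
      simp [pvOuterA, pvInnerA_eq_any, List.find?, h, ih]

-- A's fallback word scan = B's any
theorem pvFallbackA_eq_any (ul : String) (slots : List (List (String × String))) (ws : List String) :
    pvFallbackA ul slots ws
      = (if ws.any (fun w => PySem.Str.isIn w ul) then
          (if slots.isEmpty then none else slots.head?) else none) := by
  induction ws with
  | nil => rfl
  | cons w ws ih =>
    by_cases h : PySem.Chars.isIn w.toList ul.toList = true <;> simp [pvFallbackA, h, ih]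

-- ===== VERDICT (by name: the statement is the Claim_ definition above) =====
theorem parse_slot_choice_spec : Claim_equal_parse_slot_choice := by
  intro utterance slots _ _
  unfold Spec_parse_slot_choice parse_slot_choice parse_slot_choice_alt
  simp only [pvFoldB, pvOmin, pvRefIdx_map, pvOuterA_eq_find?, pvFallbackA_eq_any]
  rw [← pvRefIdx_bind (fun slot =>
        pvKeywords.any fun k =>
          PySem.Str.isIn k (PySem.Str.lower utterance) && PySem.Str.isIn k (PySem.Str.lower (pvLabel slot))) slots]
  cases hr : pvRefIdx (fun slot =>
      pvKeywords.any fun k =>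
        PySem.Str.isIn k (PySem.Str.lower utterance) && PySem.Str.isIn k (PySem.Str.lower (pvLabel slot))) slots with
  | none => simp
  | some b =>
    have hb := pvRefIdx_lt _ _ _ hr
    have hsome : slots[b]? = some slots[b] := List.getElem?_eq_getElem hb
    simp [PySem.List.pyGet?_natCast, hsome]
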